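-- pv_equiv track=rewrite | github.com/jason4193/2025-recruitment-technical-assessment | backend/py_template/devdonalds.py | parse_handwriting
-- ===== SOURCE A (Python) =====
-- from typing import List, Dict, Union
--
-- def parse_handwriting(recipeName: str) -> Union[str | None]:
-- 	def is_replaceable(char):
-- 		return char in ['-', '_']
--
-- 	newRecipeName = ''
-- 	capNext = True
--
-- 	for index in range(len(recipeName)):
-- 		# if the char is replaceable, replace it with a space and reset the capNext
-- 		if is_replaceable(recipeName[index]) and capNext != True:
-- 			newRecipeName += ' '
-- 			capNext = True
-- 		# if the char is a space, add it to the newRecipeName and reset the capNext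
-- 		if recipeName[index] == ' ':
-- 			# if the previous letter is also a space, skip this space
-- 			if capNext != True:
-- 				newRecipeName += recipeName[index]
-- 				capNext = True
-- 		# if the char is a letter, add it to the newRecipeName based on the capNext
-- 		if recipeName[index].isalpha():
-- 			if capNext:
-- 				newRecipeName += recipeName[index].upper()
-- 				capNext = False
-- 			else:
-- 				newRecipeName += recipeName[index].lower()
--
-- 	# if the newRecipeName is empty, return None
-- 	if newRecipeName == '':
-- 		return None
--
-- 	# if the newRecipeName has a space at the end, remove it
-- 	if newRecipeName[-1] == ' ':
-- 		newRecipeName = newRecipeName[:-1]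
--
-- 	return newRecipeName
-- ===== SOURCE B (Python) =====
-- def parse_handwriting(recipeName):
--     # phase 1: split into tokens on '-', '_' and ' '
--     tokens = []
--     current = []
--     for ch in recipeName:
--         if ch == '-' or ch == '_' or ch == ' ':
--             tokens.append(current)
--             current = []
--         else:
--             current.append(ch)
--     tokens.append(current)
--     # phase 2: keep only letters of each token, capitalize, drop empties
--     words = []
--     for token in tokens:
--         letters = [c for c in token if c.isalpha()]
--         if letters:
--             words.append(letters[0].upper() + ''.join(letters[1:]).lower())
--     # phase 3: join with single spaces
--     return ' '.join(words) if words else None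
-- ===== Notes on version B (the rewrite author's own statement) =====
-- stated objective: alternative
-- what changed: Replaces A's single stateful scan (capNext flag deciding casing/space emission per character via repeated string concatenation, plus a trailing-space trim) with a three-phase pipeline: tokenize on the separator set, filter-letters-and-capitalize each token, then join the non-empty words with spaces; no casing state and no trailing-space fixup exist in B.
import Mathlib
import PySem

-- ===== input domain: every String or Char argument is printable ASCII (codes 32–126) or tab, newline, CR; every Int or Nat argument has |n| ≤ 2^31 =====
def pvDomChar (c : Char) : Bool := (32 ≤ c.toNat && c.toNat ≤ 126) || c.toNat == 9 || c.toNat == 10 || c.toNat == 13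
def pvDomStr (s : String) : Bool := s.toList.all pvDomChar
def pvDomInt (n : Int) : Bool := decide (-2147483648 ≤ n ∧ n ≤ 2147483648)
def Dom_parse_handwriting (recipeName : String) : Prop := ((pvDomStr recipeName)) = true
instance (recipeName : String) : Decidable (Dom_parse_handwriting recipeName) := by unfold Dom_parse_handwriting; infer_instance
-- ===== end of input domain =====

-- B replaces A's single stateful capNext-scan by a tokenize → filter/capitalize → join pipeline (same cost, different structure).

-- ===== PORT A =====
-- one loop iteration of A: the three sequential ifs on the state (newRecipeName, capNext)
def pvStepA (st : List Char × Bool) (c : Char) : List Char × Bool :=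
  let st := if (c == '-' || c == '_') && !st.2 then (st.1 ++ [' '], true) else st
  let st := if c == ' ' then (if !st.2 then (st.1 ++ [' '], true) else st) else st
  if PySem.Chars.isalpha c then
    if st.2 then (st.1 ++ [PySem.Chars.upperChar c], false)
    else (st.1 ++ [PySem.Chars.lowerChar c], st.2)
  else st

def parse_handwriting (recipeName : String) : Option String :=
  let r := recipeName.toList.foldl pvStepA ([], true)
  let newRecipeName := r.1
  if newRecipeName = [] then none
  else
    let newRecipeName :=
      if PySem.List.pyGet? newRecipeName (-1) = some ' ' then
        PySem.List.slice newRecipeName none (some (-1))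
      else newRecipeName
    some (String.ofList newRecipeName)

-- ===== PORT B =====
-- phase 1 step: close the current token at a separator, otherwise extend it
def pvTokStep (st : List (List Char) × List Char) (c : Char) : List (List Char) × List Char :=
  if c == '-' || c == '_' || c == ' ' then (st.1 ++ [st.2], []) else (st.1, st.2 ++ [c])

-- phase 2 step: letters of the token, capitalized; empty tokens dropped
def pvWordStep (ws : List (List Char)) (t : List Char) : List (List Char) :=
  match t.filter PySem.Chars.isalpha with
  | [] => ws
  | l :: rest => ws ++ [PySem.Chars.upperChar l :: PySem.Chars.lower rest]

def parse_handwriting_alt (recipeName : String) : Option String :=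
  let p := recipeName.toList.foldl pvTokStep ([], [])
  let tokens := p.1 ++ [p.2]
  let words := tokens.foldl pvWordStep []
  if words = [] then none
  else some (String.ofList (PySem.Chars.join [' '] words))

-- ===== PRECONDITION & SPEC =====
def Spec_parse_handwriting (recipeName : String) (out : Option String) : Prop := out = parse_handwriting_alt recipeName
instance (recipeName : String) (out : Option String) : Decidable (Spec_parse_handwriting recipeName out) := by unfold Spec_parse_handwriting; infer_instance

-- ===== CLAIM (what is proved, stated in full; the proofs are below) =====
def Claim_equal_parse_handwriting : Prop := ∀ (recipeName : String), Dom_parse_handwriting recipeName → Spec_parse_handwriting recipeName (parse_handwriting recipeName)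

-- ===== LEMMAS AND PROOFS =====

-- recursive description of A's loop: (emitted suffix, final capNext) from state capNext
def pvRunA : List Char → Bool → List Char × Bool
  | [], cap => ([], cap)
  | c :: cs, cap =>
    if c == '-' || c == '_' || c == ' ' then
      if cap then pvRunA cs true
      else (' ' :: (pvRunA cs true).1, (pvRunA cs true).2)
    else if PySem.Chars.isalpha c then
      ((if cap then PySem.Chars.upperChar c else PySem.Chars.lowerChar c) :: (pvRunA cs false).1,
        (pvRunA cs false).2)
    else pvRunA cs cap

-- recursive description of B's tokenizer, from a partial current token
def pvToks : List Char → List Char → List (List Char)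
  | cur, [] => [cur]
  | cur, c :: cs =>
    if c == '-' || c == '_' || c == ' ' then cur :: pvToks [] cs else pvToks (cur ++ [c]) cs

def pvCapF (t : List Char) : List Char :=
  match t.filter PySem.Chars.isalpha with
  | [] => []
  | l :: rest => PySem.Chars.upperChar l :: PySem.Chars.lower rest

def pvWordOf (t : List Char) : Option (List Char) :=
  match t.filter PySem.Chars.isalpha with
  | [] => none
  | l :: rest => some (PySem.Chars.upperChar l :: PySem.Chars.lower rest)

-- what A emits over a token list, starting at a word boundary (capNext = true)
def pvET : List (List Char) → List Char
  | [] => []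
  | t :: ts =>
    pvCapF t ++
      (if ts.isEmpty then []
       else (if (t.filter PySem.Chars.isalpha).isEmpty then [] else [' ']) ++ pvET ts)

-- what A emits over a token list, mid-word (capNext = false)
def pvETF : List (List Char) → List Char
  | [] => []
  | t :: ts =>
    PySem.Chars.lower (t.filter PySem.Chars.isalpha) ++
      (if ts.isEmpty then [] else ' ' :: pvET ts)

lemma foldl_stepA (cs : List Char) : ∀ (acc : List Char) (cap : Bool),
    List.foldl pvStepA (acc, cap) cs = (acc ++ (pvRunA cs cap).1, (pvRunA cs cap).2) := by
  induction cs with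
  | nil => intro acc cap; simp [pvRunA]
  | cons c cs ih =>
    intro acc cap
    by_cases hsep : (c == '-' || c == '_' || c == ' ') = true
    · simp only [Bool.or_eq_true, beq_iff_eq] at hsep
      rcases hsep with (h | h) | h <;> subst h <;> cases cap <;>
        simp [List.foldl, pvStepA, pvRunA, ih, PySem.Chars.isalpha, PySem.Chars.islower,
          PySem.Chars.isupper]
    · simp only [Bool.or_eq_true, beq_iff_eq, not_or] at hsep
      obtain ⟨⟨h1, h2⟩, h3⟩ := hsep
      by_cases ha : PySem.Chars.isalpha c = true
      · cases cap <;>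
          simp [List.foldl, pvStepA, pvRunA, ih, h1, h2, h3, ha]
      · cases cap <;>
          simp [List.foldl, pvStepA, pvRunA, ih, h1, h2, h3, ha]

lemma foldl_tokStep (cs : List Char) : ∀ (ts : List (List Char)) (cur : List Char),
    (List.foldl pvTokStep (ts, cur) cs).1 ++ [(List.foldl pvTokStep (ts, cur) cs).2]
      = ts ++ pvToks cur cs := by
  induction cs with
  | nil => intro ts cur; simp [pvToks]
  | cons c cs ih =>
    intro ts cur
    by_cases hsep : (c == '-' || c == '_' || c == ' ') = true
    · simp [List.foldl, pvTokStep, pvToks, hsep, ih]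
    · simp [List.foldl, pvTokStep, pvToks, hsep, ih]

lemma foldl_wordStep (ts : List (List Char)) : ∀ (ws : List (List Char)),
    List.foldl pvWordStep ws ts = ws ++ List.filterMap pvWordOf ts := by
  induction ts with
  | nil => intro ws; simp
  | cons t ts ih =>
    intro ws
    cases hf : t.filter PySem.Chars.isalpha <;>
      simp [List.foldl, pvWordStep, pvWordOf, hf, ih]

lemma toks_acc (cs : List Char) : ∀ (cur : List Char),
    ∃ t ts, pvToks [] cs = t :: ts ∧ pvToks cur cs = (cur ++ t) :: ts := by
  induction cs with
  | nil => intro cur; exact ⟨[], [], rfl, by simp [pvToks]⟩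
  | cons c cs ih =>
    intro cur
    by_cases hsep : (c == '-' || c == '_' || c == ' ') = true
    · exact ⟨[], pvToks [] cs, by simp [pvToks, hsep], by simp [pvToks, hsep]⟩
    · obtain ⟨t, ts, h0, h1⟩ := ih [c]
      obtain ⟨t2, ts2, h02, h12⟩ := ih (cur ++ [c])
      rw [h0] at h02
      injection h02 with e1 e2
      subst e1
      subst e2
      refine ⟨c :: t, ts, by simp [pvToks, hsep, h1], ?_⟩
      simp [pvToks, hsep, h12]

lemma runA_eq_ET (cs : List Char) :
    (pvRunA cs true).1 = pvET (pvToks [] cs) ∧ (pvRunA cs false).1 = pvETF (pvToks [] cs) := by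
  induction cs with
  | nil => constructor <;> simp [pvRunA, pvToks, pvET, pvETF, pvCapF, PySem.Chars.lower]
  | cons c cs ih =>
    obtain ⟨ih1, ih2⟩ := ih
    by_cases hsep : (c == '-' || c == '_' || c == ' ') = true
    · obtain ⟨x, xs, hx, -⟩ := toks_acc cs []
      constructor
      · rw [show pvRunA (c :: cs) true = pvRunA cs true by simp only [pvRunA] <;> simp [hsep], ih1,
          show pvToks [] (c :: cs) = [] :: pvToks [] cs by simp only [pvToks] <;> simp [hsep], hx]
        simp only [pvET, pvCapF, List.filter_nil, List.isEmpty_cons, List.nil_append]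
        simp
      · rw [show (pvRunA (c :: cs) false).1 = ' ' :: (pvRunA cs true).1 by simp only [pvRunA] <;> simp [hsep], ih1,
          show pvToks [] (c :: cs) = [] :: pvToks [] cs by simp only [pvToks] <;> simp [hsep], hx]
        cases xs <;> simp only [pvET, pvETF, pvCapF] <;> simp [PySem.Chars.lower]
    · obtain ⟨t, ts, h0, h1⟩ := toks_acc cs [c]
      have htoks : pvToks [] (c :: cs) = (c :: t) :: ts := by
        simp only [pvToks] <;> simpa [hsep] using h1
      by_cases ha : PySem.Chars.isalpha c = true
      · have hfil : (c :: t).filter PySem.Chars.isalpha = c :: t.filter PySem.Chars.isalpha := by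
          simp [List.filter, ha]
        constructor
        · rw [show (pvRunA (c :: cs) true).1 = PySem.Chars.upperChar c :: (pvRunA cs false).1 by
            simp only [pvRunA] <;> simp [hsep, ha], ih2, htoks, h0]
          cases ts <;> simp only [pvET, pvETF, pvCapF, hfil] <;> simp [PySem.Chars.lower]
        · rw [show (pvRunA (c :: cs) false).1 = PySem.Chars.lowerChar c :: (pvRunA cs false).1 by
            simp only [pvRunA] <;> simp [hsep, ha], ih2, htoks, h0]
          cases ts <;> simp only [pvET, pvETF, pvCapF, hfil] <;> simp [PySem.Chars.lower]
      · have hfil : (c :: t).filter PySem.Chars.isalpha = t.filter PySem.Chars.isalpha := by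
          simp [List.filter, ha]
        have hrun : pvRunA (c :: cs) = pvRunA cs := by
          funext cap; simp only [pvRunA] <;> simp [hsep, ha]
        constructor
        · rw [hrun, ih1, htoks, h0]
          cases ts <;> simp only [pvET, pvETF, pvCapF, hfil] <;> simp
        · rw [hrun, ih2, htoks, h0]
          cases ts <;> simp only [pvET, pvETF, pvCapF, hfil] <;> simp

lemma ET_words (ts : List (List Char)) :
    (List.filterMap pvWordOf ts = [] ∧ pvET ts = []) ∨
    (List.filterMap pvWordOf ts ≠ [] ∧
      (pvET ts = List.intercalate [' '] (List.filterMap pvWordOf ts) ∨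
       pvET ts = List.intercalate [' '] (List.filterMap pvWordOf ts) ++ [' '])) := by
  induction ts with
  | nil => left; simp only [pvET]; simp
  | cons t ts ih =>
    cases hf : t.filter PySem.Chars.isalpha with
    | nil =>
      have hw : pvWordOf t = none := by simp [pvWordOf, hf]
      have hcap : pvCapF t = [] := by simp [pvCapF, hf]
      cases ts with
      | nil => left; simp only [pvET, hcap, hw]; simp [hw]
      | cons x xs =>
        have hET : pvET (t :: x :: xs) = pvET (x :: xs) := by simp only [pvET, hcap, hf]; simp
        rcases ih with ⟨h1, h2⟩ | ⟨h1, h2⟩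
        · left; simp [hET, hw, h1, h2]
        · right
          constructor
          · simpa [hw] using h1
          · simpa [hET, hw] using h2
    | cons l rest =>
      have hw : pvWordOf t = some (PySem.Chars.upperChar l :: PySem.Chars.lower rest) := by
        simp [pvWordOf, hf]
      have hcap : pvCapF t = PySem.Chars.upperChar l :: PySem.Chars.lower rest := by
        simp [pvCapF, hf]
      cases ts with
      | nil =>
        right
        constructor
        · simp [hw]
        · left; simp only [pvET]; simp [hcap, hw, List.intercalate]
      | cons x xs =>
        have hET : pvET (t :: x :: xs)
            = pvCapF t ++ [' '] ++ pvET (x :: xs) := by simp only [pvET, hf]; simp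
        rcases ih with ⟨h1, h2⟩ | ⟨h1, h2⟩
        · right
          refine ⟨by simp [hw], Or.inr ?_⟩
          simp [hET, hcap, hw, h1, h2, List.intercalate]
        · right
          refine ⟨by simp [hw], ?_⟩
          obtain ⟨w, ws', hws⟩ : ∃ w ws', List.filterMap pvWordOf (x :: xs) = w :: ws' := by
            cases h : List.filterMap pvWordOf (x :: xs) with
            | nil => exact absurd h h1
            | cons w ws' => exact ⟨w, ws', rfl⟩
          rw [hws] at h2
          have hinter : List.intercalate [' '] (List.filterMap pvWordOf (t :: x :: xs))
              = pvCapF t ++ [' '] ++ List.intercalate [' '] (w :: ws') := by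
            simp [hw, hws, hcap, List.intercalate]
          rcases h2 with h2 | h2
          · exact Or.inl (by rw [hET, h2, hinter])
          · exact Or.inr (by rw [hET, h2, hinter]; simp)

lemma pvLeToNat {a b : Char} (hab : a ≤ b) : a.toNat ≤ b.toNat := by
  have := Char.le_def.mp hab
  rwa [UInt32.le_iff_toNat_le] at this

lemma upperChar_ne_space (c : Char) (h : PySem.Chars.isalpha c = true) :
    PySem.Chars.upperChar c ≠ ' ' := by
  simp only [PySem.Chars.isalpha, PySem.Chars.islower, PySem.Chars.isupper, Bool.or_eq_true,
    Bool.and_eq_true, decide_eq_true_eq] at h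
  simp only [PySem.Chars.upperChar, PySem.Chars.islower, Bool.and_eq_true, decide_eq_true_eq]
  split
  · rename_i h2
    have h2a : 97 ≤ c.toNat := by
      have := pvLeToNat h2.1; rwa [show ('a' : Char).toNat = 97 from rfl] at this
    have h2b : c.toNat ≤ 122 := by
      have := pvLeToNat h2.2; rwa [show ('z' : Char).toNat = 122 from rfl] at this
    intro he
    have ht : (Char.ofNat (c.toNat - 32)).toNat = (' ' : Char).toNat := by rw [he]
    rw [show (Char.ofNat (c.toNat - 32)).toNat = c.toNat - 32 by
      unfold Char.ofNat
      rw [dif_pos (by simp [Nat.isValidChar]; omega)]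
      rfl] at ht
    rw [show (' ' : Char).toNat = 32 from rfl] at ht
    omega
  · intro he
    rcases h with ⟨hl, -⟩ | ⟨hl, -⟩ <;>
    · have hla := pvLeToNat hl
      rw [he] at hla
      exact absurd hla (by decide)

lemma lowerChar_ne_space (c : Char) (h : PySem.Chars.isalpha c = true) :
    PySem.Chars.lowerChar c ≠ ' ' := by
  simp only [PySem.Chars.isalpha, PySem.Chars.islower, PySem.Chars.isupper, Bool.or_eq_true,
    Bool.and_eq_true, decide_eq_true_eq] at h
  simp only [PySem.Chars.lowerChar, PySem.Chars.isupper, Bool.and_eq_true, decide_eq_true_eq]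
  split
  · rename_i h2
    have h2a : 65 ≤ c.toNat := by
      have := pvLeToNat h2.1; rwa [show ('A' : Char).toNat = 65 from rfl] at this
    have h2b : c.toNat ≤ 90 := by
      have := pvLeToNat h2.2; rwa [show ('Z' : Char).toNat = 90 from rfl] at this
    intro he
    have ht : (Char.ofNat (c.toNat + 32)).toNat = (' ' : Char).toNat := by rw [he]
    rw [show (Char.ofNat (c.toNat + 32)).toNat = c.toNat + 32 by
      unfold Char.ofNat
      rw [dif_pos (by simp [Nat.isValidChar]; omega)]
      rfl] at ht
    rw [show (' ' : Char).toNat = 32 from rfl] at ht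
    omega
  · intro he
    rcases h with ⟨hl, -⟩ | ⟨hl, -⟩ <;>
    · have hla := pvLeToNat hl
      rw [he] at hla
      exact absurd hla (by decide)

lemma wordOf_good (t w : List Char) (h : pvWordOf t = some w) :
    w ≠ [] ∧ w.getLast? ≠ some ' ' := by
  rcases hf : t.filter PySem.Chars.isalpha with _ | ⟨l, rest⟩
  · simp [pvWordOf, hf] at h
  · have hw : w = PySem.Chars.upperChar l :: PySem.Chars.lower rest := by
      simpa [pvWordOf, hf] using h.symm
    have halpha : ∀ c ∈ l :: rest, PySem.Chars.isalpha c = true := by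
      intro c hc
      have : c ∈ t.filter PySem.Chars.isalpha := by rw [hf]; exact hc
      exact List.of_mem_filter this
    subst hw
    refine ⟨by simp, ?_⟩
    rcases List.eq_nil_or_concat rest with rfl | ⟨r', x, rfl⟩
    · simpa [PySem.Chars.lower] using
        upperChar_ne_space l (halpha l (by simp))
    · rw [show PySem.Chars.upperChar l :: PySem.Chars.lower (r'.concat x)
          = (PySem.Chars.upperChar l :: List.map PySem.Chars.lowerChar r')
              ++ [PySem.Chars.lowerChar x] by simp [PySem.Chars.lower]]
      rw [List.getLast?_concat]
      simpa using lowerChar_ne_space x (halpha x (by simp))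

lemma intercalate_good (ws : List (List Char))
    (hmem : ∀ w ∈ ws, w ≠ [] ∧ w.getLast? ≠ some ' ') (hne : ws ≠ []) :
    List.intercalate [' '] ws ≠ [] ∧ (List.intercalate [' '] ws).getLast? ≠ some ' ' := by
  induction ws with
  | nil => exact absurd rfl hne
  | cons w ws ih =>
    cases ws with
    | nil =>
      simpa [List.intercalate] using hmem w (by simp)
    | cons x xs =>
      have hih := ih (fun v hv => hmem v (by simp [hv])) (by simp)
      rw [show List.intercalate [' '] (w :: x :: xs)
          = w ++ [' '] ++ List.intercalate [' '] (x :: xs) by simp [List.intercalate]]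
      constructor
      · simpa using fun h _ => (hmem w (by simp)).1 h
      · rw [List.append_assoc,
          List.getLast?_append_of_ne_nil w (by simp),
          List.getLast?_append_of_ne_nil [' '] hih.1]
        exact hih.2

-- ===== VERDICT (by name: the statement is the Claim_ definition above) =====
theorem parse_handwriting_spec : Claim_equal_parse_handwriting := by
  intro s _
  unfold Spec_parse_handwriting parse_handwriting parse_handwriting_alt
  have htok := foldl_tokStep s.toList [] []
  simp only [List.nil_append] at htok
  simp only [foldl_stepA, htok, foldl_wordStep, List.nil_append, (runA_eq_ET s.toList).1]
  rcases ET_words (pvToks [] s.toList) with ⟨h1, h2⟩ | ⟨h1, h2⟩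
  · rw [if_pos h2, if_pos h1]
  · have hgood : ∀ w ∈ List.filterMap pvWordOf (pvToks [] s.toList),
        w ≠ [] ∧ w.getLast? ≠ some ' ' := by
      intro w hw
      obtain ⟨t, -, ht⟩ := List.mem_filterMap.mp hw
      exact wordOf_good t w ht
    obtain ⟨hIne, hIlast⟩ := intercalate_good _ hgood h1
    have hjoin : PySem.Chars.join [' '] (List.filterMap pvWordOf (pvToks [] s.toList))
        = List.intercalate [' '] (List.filterMap pvWordOf (pvToks [] s.toList)) := by
      simp [PySem.Chars.join]
    rcases h2 with h2 | h2
    · have hpy : PySem.List.pyGet?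
          (List.intercalate [' '] (List.filterMap pvWordOf (pvToks [] s.toList))) (-1)
          = (List.intercalate [' '] (List.filterMap pvWordOf (pvToks [] s.toList))).getLast? := by
        simp [pysem]
      rw [h2, if_neg hIne, if_neg h1, hjoin, if_neg (by rw [hpy]; exact hIlast)]
    · have hpy : PySem.List.pyGet?
          (List.intercalate [' '] (List.filterMap pvWordOf (pvToks [] s.toList)) ++ [' ']) (-1)
          = (List.intercalate [' ']
              (List.filterMap pvWordOf (pvToks [] s.toList)) ++ [' ']).getLast? := by
        simp [pysem]
      have hsl : PySem.List.slice
          (List.intercalate [' '] (List.filterMap pvWordOf (pvToks [] s.toList)) ++ [' '])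
          none (some (-1))
          = (List.intercalate [' ']
              (List.filterMap pvWordOf (pvToks [] s.toList)) ++ [' ']).dropLast := by
        simp [pysem]
      rw [h2, if_neg (by simp), if_neg h1, hjoin,
        if_pos (by rw [hpy, List.getLast?_concat]), hsl, List.dropLast_concat]
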